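-- pv_equiv track=rewrite | github.com/orianek1/Contact-tracing | CPSC217F20A4-OrianeKacoutie.py | potentialZombies
-- ===== SOURCE A (Python) =====
-- def potentialZombies(nameDictionary):
--     res3=[]
--
-- #creating a list for potential zombies
--     potentialZombiesList=[]
-- #this code loos throught the values in the list
--     for values in nameDictionary.values():
--         #this is the count funtion to count the number of zombies in the list
--         count = 0
--         #this code is to loop through the keys in the list
--         for keys in nameDictionary.keys():
--             #this is to check if a key item is present in the values
--             if keys not in values:
--                 count +=1
--                 #this is to add the key item that are potential zombies to the new list created
--                 if count == len(nameDictionary.keys()):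
--                    potentialZombiesList.append(values)
--                 for i in potentialZombiesList:
--                     if i not in res3:
--                         res3.append(i)
--     return (res3)
-- ===== SOURCE B (Python) =====
-- def potentialZombies(nameDictionary):
--     keySet = set(nameDictionary)
--     res = []
--     for values in nameDictionary.values():
--         if keySet.isdisjoint(values) and values not in res:
--             res.append(values)
--     return res
-- ===== Notes on version B (the rewrite author's own statement) =====
-- stated objective: faster
-- what changed: Single pass over the values with a precomputed key set tested by set-disjointness and first-seen dedup, replacing A's per-value scan over all keys with a counter and a quadratic re-dedup pass on every miss.
import Mathlib
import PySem

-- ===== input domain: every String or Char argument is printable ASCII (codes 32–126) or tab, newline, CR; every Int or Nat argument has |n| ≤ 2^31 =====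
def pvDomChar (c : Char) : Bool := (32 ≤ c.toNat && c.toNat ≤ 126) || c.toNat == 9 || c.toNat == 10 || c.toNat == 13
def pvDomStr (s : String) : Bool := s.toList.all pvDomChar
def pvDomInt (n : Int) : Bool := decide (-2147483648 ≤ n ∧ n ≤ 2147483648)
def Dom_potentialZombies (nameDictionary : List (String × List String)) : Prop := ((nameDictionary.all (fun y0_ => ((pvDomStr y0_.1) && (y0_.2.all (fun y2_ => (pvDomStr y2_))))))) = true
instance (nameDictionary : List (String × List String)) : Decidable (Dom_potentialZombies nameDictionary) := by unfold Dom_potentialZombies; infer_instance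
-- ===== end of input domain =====

-- B replaces A's per-value scan over all keys (with a running counter and a re-dedup pass of the
-- whole accumulated list on every miss) by a single pass over the values with a precomputed key
-- set, one set-disjointness test and a first-seen dedup per value; measurably faster.

-- ===== PORT A =====
-- A's inner dedup pass: `for i in potentialZombiesList: if i not in res3: res3.append(i)`
def pvDedupAdd (r : List (List String)) (i : List String) : List (List String) :=
  if !r.contains i then r ++ [i] else r

-- one iteration of A's loop over the keys; state = (res3, potentialZombiesList, count)
def pvInnerStep (n : Int) (values : List String)
    (s : List (List String) × List (List String) × Int) (keys : String) :
    List (List String) × List (List String) × Int :=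
  if !values.contains keys then
    let count := s.2.2 + 1
    let pzl := if count == n then s.2.1 ++ [values] else s.2.1
    let res3 := pzl.foldl pvDedupAdd s.1
    (res3, pzl, count)
  else s

def potentialZombies (nameDictionary : List (String × List String)) : List (List String) :=
  let d := PySem.Dict.ofList nameDictionary
  let st := d.values.foldl
    (fun (st : List (List String) × List (List String)) values =>
      let s := d.keys.foldl (pvInnerStep (d.keys.length : Int) values) (st.1, st.2, (0 : Int))
      (s.1, s.2.1))
    ([], [])
  st.1

-- ===== PORT B =====
def potentialZombies_alt (nameDictionary : List (String × List String)) : List (List String) :=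
  let d := PySem.Dict.ofList nameDictionary
  let keySet : PySem.Set String := PySem.Set.ofList d.keys
  d.values.foldl
    (fun res values =>
      if PySem.Set.isdisjoint keySet values && !res.contains values then res ++ [values] else res)
    []

-- ===== PRECONDITION & SPEC =====
def Spec_potentialZombies (nameDictionary : List (String × List String)) (out : List (List String)) : Prop := out = potentialZombies_alt nameDictionary
instance (nameDictionary : List (String × List String)) (out : List (List String)) : Decidable (Spec_potentialZombies nameDictionary out) := by unfold Spec_potentialZombies; infer_instance

-- ===== CLAIM (what is proved, stated in full; the proofs are below) =====
def Claim_equal_potentialZombies : Prop := ∀ (nameDictionary : List (String × List String)), Dom_potentialZombies nameDictionary → Spec_potentialZombies nameDictionary (potentialZombies nameDictionary)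

-- ===== LEMMAS AND PROOFS =====

-- number of keys of the dict that are missing from `values`
def pvMiss (values : List String) (ks : List String) : Nat :=
  ks.countP (fun k => !values.contains k)

theorem pvDedupFold_id (pzl : List (List String)) (res : List (List String))
    (hinv : ∀ i ∈ pzl, i ∈ res) : pzl.foldl pvDedupAdd res = res := by
  induction pzl generalizing res with
  | nil => rfl
  | cons i t ih =>
    have hi : res.contains i = true := by
      simpa [List.contains_iff_mem] using hinv i (by simp)
    simp only [List.foldl_cons, pvDedupAdd, hi, Bool.not_true, Bool.false_eq_true,
      if_false]
    exact ih res (fun j hj => hinv j (by simp [hj]))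

theorem pvMiss_cons_pos (v : List String) (k : String) (t : List String)
    (hk : v.contains k = false) : pvMiss v (k :: t) = pvMiss v t + 1 := by
  unfold pvMiss
  rw [List.countP_cons, hk]
  rfl

theorem pvMiss_cons_hit (v : List String) (k : String) (t : List String)
    (hk : v.contains k = true) : pvMiss v (k :: t) = pvMiss v t := by
  unfold pvMiss
  rw [List.countP_cons, hk]
  rfl

theorem pvInner_no_miss (n : Int) (v : List String) (ks : List String)
    (s : List (List String) × List (List String) × Int)
    (h : pvMiss v ks = 0) : ks.foldl (pvInnerStep n v) s = s := by
  induction ks generalizing s with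
  | nil => rfl
  | cons k t ih =>
    have hk : v.contains k = true := by
      by_contra hc
      rw [Bool.not_eq_true] at hc
      rw [pvMiss_cons_pos v k t hc] at h
      omega
    rw [pvMiss_cons_hit v k t hk] at h
    simp only [List.foldl_cons, pvInnerStep, hk, Bool.not_true, Bool.false_eq_true, if_false]
    exact ih s h

theorem pvInner_lt (n : Int) (v : List String) (ks : List String)
    (res pzl : List (List String)) (c : Int)
    (hinv : ∀ i ∈ pzl, i ∈ res)
    (h : c + (pvMiss v ks : Int) < n) :
    ks.foldl (pvInnerStep n v) (res, pzl, c) = (res, pzl, c + (pvMiss v ks : Int)) := by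
  induction ks generalizing c with
  | nil => simp [pvMiss]
  | cons k t ih =>
    by_cases hk : v.contains k = true
    · rw [pvMiss_cons_hit v k t hk] at h ⊢
      simp only [List.foldl_cons, pvInnerStep, hk, Bool.not_true, Bool.false_eq_true, if_false]
      exact ih c h
    · rw [Bool.not_eq_true] at hk
      rw [pvMiss_cons_pos v k t hk] at h ⊢
      have hne : ((c + 1) == n) = false := by
        rw [beq_eq_false_iff_ne]
        omega
      simp only [List.foldl_cons, pvInnerStep, hk, Bool.not_false, if_true, hne,
        Bool.false_eq_true, if_false]
      rw [pvDedupFold_id pzl res hinv]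
      rw [ih (c + 1) (by push_cast at h ⊢; omega)]
      push_cast
      ring_nf

theorem pvInner_eq (n : Int) (v : List String) (ks : List String)
    (res pzl : List (List String)) (c : Int)
    (hinv : ∀ i ∈ pzl, i ∈ res)
    (h : c + (pvMiss v ks : Int) = n) (hm : 0 < pvMiss v ks) :
    ks.foldl (pvInnerStep n v) (res, pzl, c) = (pvDedupAdd res v, pzl ++ [v], n) := by
  induction ks generalizing c with
  | nil => simp [pvMiss] at hm
  | cons k t ih =>
    by_cases hk : v.contains k = true
    · rw [pvMiss_cons_hit v k t hk] at h hm
      simp only [List.foldl_cons, pvInnerStep, hk, Bool.not_true, Bool.false_eq_true, if_false]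
      exact ih c h hm
    · rw [Bool.not_eq_true] at hk
      rw [pvMiss_cons_pos v k t hk] at h
      by_cases ht : pvMiss v t = 0
      · -- append happens now; remaining keys all hit
        have hcn : ((c + 1) == n) = true := by
          rw [beq_iff_eq]; rw [ht] at h; push_cast at h; omega
        simp only [List.foldl_cons, pvInnerStep, hk, Bool.not_false, if_true, hcn]
        rw [List.foldl_append, pvDedupFold_id pzl res hinv]
        simp only [List.foldl_cons, List.foldl_nil]
        rw [pvInner_no_miss n v t _ ht]
        have : c + 1 = n := by rw [ht] at h; push_cast at h; omega
        rw [this]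
      · have hne : ((c + 1) == n) = false := by
          rw [beq_eq_false_iff_ne]
          push_cast at h; omega
        simp only [List.foldl_cons, pvInnerStep, hk, Bool.not_false, if_true, hne,
          Bool.false_eq_true, if_false]
        rw [pvDedupFold_id pzl res hinv]
        exact ih (c + 1) (by push_cast at h ⊢; omega) (by omega)

theorem pvOuter (ks : List String) (hks : ks ≠ []) (vs : List (List String))
    (res pzl : List (List String)) (hinv : ∀ i ∈ pzl, i ∈ res) :
    (vs.foldl
      (fun (st : List (List String) × List (List String)) values =>
        let s := ks.foldl (pvInnerStep (ks.length : Int) values) (st.1, st.2, (0 : Int))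
        (s.1, s.2.1))
      (res, pzl)).1 =
    vs.foldl
      (fun r values =>
        if PySem.Set.isdisjoint (PySem.Set.ofList ks) values && !r.contains values then
          r ++ [values] else r)
      res := by
  induction vs generalizing res pzl with
  | nil => rfl
  | cons v vs ih =>
    simp only [List.foldl_cons]
    by_cases hall : ∀ k ∈ ks, v.contains k = false
    · have hm : pvMiss v ks = ks.length := by
        unfold pvMiss
        rw [List.countP_eq_length]
        intro a ha
        rw [hall a ha]
        rfl
      have hm0 : 0 < pvMiss v ks := by
        rw [hm]
        cases ks with
        | nil => exact absurd rfl hks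
        | cons a l => simp
      have hinner := pvInner_eq (ks.length : Int) v ks res pzl 0 hinv
        (by rw [hm, zero_add]) hm0
      have hdisj : PySem.Set.isdisjoint (PySem.Set.ofList ks) v = true := by
        rw [PySem.Set.isdisjoint_iff]
        intro x hx
        have hx' : x ∈ ks := (PySem.Set.mem_ofList _ _).1 hx
        have := hall x hx'
        intro hmem
        simp [hmem] at this
      simp only [hinner, hdisj, Bool.true_and]
      by_cases hcv : res.contains v = true
      · have hmem : v ∈ res := by simpa using hcv
        have hda : pvDedupAdd res v = res := by
          simp [pvDedupAdd, hmem]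
        rw [hda, hcv]
        simp only [Bool.not_true, Bool.false_eq_true, if_false]
        exact ih res (pzl ++ [v]) (by
          intro i hi
          rcases List.mem_append.1 hi with h1 | h1
          · exact hinv i h1
          · simp only [List.mem_singleton] at h1
            subst h1
            exact hmem)
      · rw [Bool.not_eq_true] at hcv
        have hmem : v ∉ res := by simpa using hcv
        have hda : pvDedupAdd res v = res ++ [v] := by
          simp [pvDedupAdd, hmem]
        rw [hda, hcv]
        simp only [Bool.not_false, if_true]
        exact ih (res ++ [v]) (pzl ++ [v]) (by
          intro i hi
          rcases List.mem_append.1 hi with h1 | h1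
          · exact List.mem_append.2 (Or.inl (hinv i h1))
          · exact List.mem_append.2 (Or.inr h1))
    · push Not at hall
      obtain ⟨k, hk, hkc⟩ := hall
      rw [Bool.ne_false_iff] at hkc
      have hlt : pvMiss v ks < ks.length := by
        have hle : pvMiss v ks ≤ ks.length := List.countP_le_length ..
        rcases lt_or_eq_of_le hle with h | h
        · exact h
        · exfalso
          unfold pvMiss at h
          rw [List.countP_eq_length] at h
          have := h k hk
          rw [hkc] at this
          simp at this
      have hinner := pvInner_lt (ks.length : Int) v ks res pzl 0 hinv
        (by push_cast; omega)
      have hdisj : PySem.Set.isdisjoint (PySem.Set.ofList ks) v = false := by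
        rw [Bool.eq_false_iff]
        intro hcon
        rw [PySem.Set.isdisjoint_iff] at hcon
        have := hcon k ((PySem.Set.mem_ofList _ _).2 hk)
        exact this (by simpa using hkc)
      simp only [hinner, hdisj, Bool.false_and, Bool.false_eq_true, if_false]
      exact ih res pzl hinv

theorem pvMain (nd : List (String × List String)) :
    potentialZombies nd = potentialZombies_alt nd := by
  unfold potentialZombies potentialZombies_alt
  generalize PySem.Dict.ofList nd = d
  obtain ⟨items⟩ := d
  cases items with
  | nil => rfl
  | cons p rest =>
    have hks : ((PySem.Dict.mk (p :: rest) : PySem.Dict String (List String)).keys) ≠ [] := by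
      simp [PySem.Dict.keys]
    exact pvOuter _ hks _ [] [] (by simp)

-- ===== VERDICT (by name: the statement is the Claim_ definition above) =====
theorem potentialZombies_spec : Claim_equal_potentialZombies := by
  intro nameDictionary _
  exact pvMain nameDictionary
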